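-- pv_equiv track=rewrite | github.com/MassiPozzuto/IP | Python/Parcial/submission.py | agrupar_por_autor_con_cota
-- ===== SOURCE A (Python) =====
-- def agrupar_por_autor_con_cota(libros: dict[str, str], cota: int) -> dict[str, list[str]]:
-- 	res: dict[str, list[str]] = {}
-- 	for libro, autor in libros.items():
-- 		if cantidad_apariciones_autor(libros, autor) >= cota:
-- 			if autor not in res.keys():
-- 				res[autor] = [libro]
-- 			else:
-- 				res[autor].append(libro)
--
-- 	return res
--
-- def cantidad_apariciones_autor(libros: dict[str, str], autor_buscado: str) -> int:
-- 	res: int = 0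
-- 	for autor in libros.values():
-- 		if autor == autor_buscado:
-- 			res += 1
--
-- 	return res
-- ===== SOURCE B (Python) =====
-- def agrupar_por_autor_con_cota(libros: dict[str, str], cota: int) -> dict[str, list[str]]:
-- 	# build the full grouping in one pass, then keep the groups meeting the threshold
-- 	grupos: dict[str, list[str]] = {}
-- 	for libro, autor in libros.items():
-- 		grupos.setdefault(autor, []).append(libro)
-- 	return {autor: ls for autor, ls in grupos.items() if len(ls) >= cota}
-- ===== Notes on version B (the rewrite author's own statement) =====
-- stated objective: faster
-- what changed: B builds the complete author-to-books grouping dict in one pass and then filters entries by group size, instead of A's per-book rescan of all values (cantidad_apariciones_autor) against the threshold.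
import Mathlib
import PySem

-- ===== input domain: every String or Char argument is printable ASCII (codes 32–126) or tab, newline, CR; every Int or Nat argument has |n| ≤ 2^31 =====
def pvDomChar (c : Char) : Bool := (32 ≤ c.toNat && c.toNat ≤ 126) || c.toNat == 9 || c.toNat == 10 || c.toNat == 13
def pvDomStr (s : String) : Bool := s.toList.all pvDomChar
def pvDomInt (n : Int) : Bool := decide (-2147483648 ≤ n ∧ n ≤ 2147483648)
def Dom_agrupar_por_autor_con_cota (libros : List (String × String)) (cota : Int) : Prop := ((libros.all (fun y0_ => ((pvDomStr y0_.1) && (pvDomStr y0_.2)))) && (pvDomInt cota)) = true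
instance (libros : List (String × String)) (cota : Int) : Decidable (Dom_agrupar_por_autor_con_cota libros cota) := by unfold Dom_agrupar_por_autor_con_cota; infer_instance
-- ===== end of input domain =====

-- B builds the full author→books grouping in one pass and then filters by group size,
-- replacing A's per-book rescan of all values against the threshold (objective: faster, measured).

-- ===== PORT A =====
def cantidad_apariciones_autor (libros : List (String × String)) (autor_buscado : String) : Int :=
  (libros.map Prod.snd).foldl (fun res autor => if autor == autor_buscado then res + 1 else res) 0

def agrupar_por_autor_con_cota (libros : List (String × String)) (cota : Int) : List (String × List String) :=
  (libros.foldl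
    (fun res p =>
      if cantidad_apariciones_autor libros p.2 ≥ cota then
        if res.contains p.2 = false then res.insert p.2 [p.1]
        else res.modify p.2 [] (fun l => l ++ [p.1])
      else res)
    (PySem.Dict.empty : PySem.Dict String (List String))).items

-- ===== PORT B =====
def agrupar_por_autor_con_cota_alt (libros : List (String × String)) (cota : Int) : List (String × List String) :=
  let grupos : PySem.Dict String (List String) :=
    libros.foldl (fun g p => g.modify p.2 [] (fun l => l ++ [p.1])) PySem.Dict.empty
  grupos.items.filter (fun q => decide ((q.2.length : Int) ≥ cota))

-- ===== PRECONDITION & SPEC =====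
def Spec_agrupar_por_autor_con_cota (libros : List (String × String)) (cota : Int) (out : List (String × List String)) : Prop := out = agrupar_por_autor_con_cota_alt libros cota
instance (libros : List (String × String)) (cota : Int) (out : List (String × List String)) : Decidable (Spec_agrupar_por_autor_con_cota libros cota out) := by unfold Spec_agrupar_por_autor_con_cota; infer_instance

-- ===== CLAIM (what is proved, stated in full; the proofs are below) =====
def Claim_equal_agrupar_por_autor_con_cota : Prop := ∀ (libros : List (String × String)) (cota : Int), Dom_agrupar_por_autor_con_cota libros cota → Spec_agrupar_por_autor_con_cota libros cota (agrupar_por_autor_con_cota libros cota)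

-- ===== LEMMAS AND PROOFS =====

-- cantidad_apariciones_autor counts occurrences of the author among the values
theorem pvFoldCount (l : List String) (a : String) (n : Int) :
    l.foldl (fun res autor => if autor == a then res + 1 else res) n = n + (l.count a : Int) := by
  induction l generalizing n with
  | nil => simp
  | cons x xs ih =>
    by_cases h : x = a
    · subst h
      rw [List.foldl_cons, if_pos (by simp), ih, List.count_cons_self]
      push_cast; ring
    · rw [List.foldl_cons, if_neg (by simp [h]), ih]
      simp [h]

theorem cantidad_eq_count (libros : List (String × String)) (a : String) :
    cantidad_apariciones_autor libros a = ((libros.map Prod.snd).count a : Int) := by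
  unfold cantidad_apariciones_autor
  rw [pvFoldCount]
  ring

-- the threshold predicate on an author key
def pvPb (libros : List (String × String)) (cota : Int) (k : String) : Bool :=
  decide (((libros.map Prod.snd).count k : Int) ≥ cota)

-- A's two branches are one dict 'modify'
theorem pvBranch (d : PySem.Dict String (List String)) (k v : String) :
    (if d.contains k = false then d.insert k [v] else d.modify k [] (fun l => l ++ [v]))
      = d.modify k [] (fun l => l ++ [v]) := by
  by_cases h : d.contains k = false
  · have hm : d.modify k [] (fun l => l ++ [v]) = d.insert k (d.getD k [] ++ [v]) := rfl
    rw [if_pos h, hm, PySem.Dict.getD_of_not_contains d [] h]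
    simp
  · rw [if_neg h]

-- the full grouping dict, characterised by keys (first occurrence) and per-key book lists
theorem pvGroupItems (l : List (String × String)) :
    (l.foldl (fun g p => g.modify p.2 [] (fun s => s ++ [p.1])) (PySem.Dict.empty : PySem.Dict String (List String))).items
      = (PySem.Set.ofList (l.map Prod.snd)).map
          (fun k => (k, (l.filter (fun p => p.2 == k)).map Prod.fst)) := by
  have hnd : (l.foldl (fun g p => g.modify p.2 [] (fun s => s ++ [p.1])) (PySem.Dict.empty : PySem.Dict String (List String))).keys.Nodup :=
    PySem.Dict.nodup_keys_foldl_modify_key l Prod.snd [] (fun d x s => s ++ [x.1]) _ PySem.Dict.nodup_keys_empty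
  have hkeys : (l.foldl (fun g p => g.modify p.2 [] (fun s => s ++ [p.1])) (PySem.Dict.empty : PySem.Dict String (List String))).keys
      = PySem.Set.ofList (l.map Prod.snd) := by
    rw [PySem.Dict.keys_foldl_modify_key l Prod.snd [] (fun d x s => s ++ [x.1])]
    simp [PySem.Set.update_nil_left]
  have hswap : (l.foldl (fun g p => g.modify p.2 [] (fun s => s ++ [p.1])) (PySem.Dict.empty : PySem.Dict String (List String)))
      = ((l.map (fun p => (p.2, p.1))).foldl (fun g q => g.modify q.1 [] (fun s => s ++ [q.2])) (PySem.Dict.empty : PySem.Dict String (List String))) := by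
    rw [List.foldl_map]
  have hget : ∀ k, (l.foldl (fun g p => g.modify p.2 [] (fun s => s ++ [p.1])) (PySem.Dict.empty : PySem.Dict String (List String))).getD k []
      = (l.filter (fun p => p.2 == k)).map Prod.fst := by
    intro k
    rw [hswap, PySem.Dict.getD_foldl_modify_append]
    simp [List.filter_map, Function.comp_def]
  rw [PySem.Dict.items_eq_map_keys _ hnd [], hkeys]
  exact List.map_congr_left (fun k _ => by rw [hget k])

-- ofList commutes with filter (first occurrences of surviving elements)
theorem pvOfListFoldFilter (p : String → Bool) (xs : List String) (s : List String) :
    (xs.filter p).foldl PySem.Set.add (s.filter p) = (xs.foldl PySem.Set.add s).filter p := by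
  induction xs generalizing s with
  | nil => rfl
  | cons x xs ih =>
    by_cases hp : p x
    · have h1 : List.filter p (x :: xs) = x :: List.filter p xs := by
        simp [hp]
      have hadd : PySem.Set.add (List.filter p s) x = List.filter p (PySem.Set.add s x) := by
        unfold PySem.Set.add
        by_cases hx : x ∈ s
        · simp [hx, hp]
        · simp [hx, List.filter_append, hp]
      rw [h1, List.foldl_cons, List.foldl_cons, hadd, ih]
    · have h1 : List.filter p (x :: xs) = List.filter p xs := by
        simp [hp]
      have hadd : List.filter p (PySem.Set.add s x) = List.filter p s := by
        unfold PySem.Set.add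
        by_cases hx : x ∈ s
        · simp [hx]
        · simp [hx, List.filter_append, hp]
      rw [h1, List.foldl_cons, ← ih, hadd]

theorem pvOfListFilter (p : String → Bool) (xs : List String) :
    PySem.Set.ofList (xs.filter p) = (PySem.Set.ofList xs).filter p := by
  simpa [PySem.Set.ofList, PySem.Set.empty] using pvOfListFoldFilter p xs []

-- group size = author's count among the values
theorem pvGroupLen (libros : List (String × String)) (k : String) :
    (libros.filter (fun p => p.2 == k)).length = (libros.map Prod.snd).count k := by
  simp [List.count, List.countP_eq_length_filter, List.filter_map, Function.comp_def,
    List.length_map]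

-- A's conditional loop is the unconditional grouping loop over the filtered input
theorem agrupar_eq_filtered (libros : List (String × String)) (cota : Int) :
    agrupar_por_autor_con_cota libros cota
      = ((libros.filter (fun p => pvPb libros cota p.2)).foldl
          (fun g p => g.modify p.2 [] (fun s => s ++ [p.1])) (PySem.Dict.empty : PySem.Dict String (List String))).items := by
  unfold agrupar_por_autor_con_cota
  have hfun : (fun (res : PySem.Dict String (List String)) (p : String × String) =>
        if cantidad_apariciones_autor libros p.2 ≥ cota then
          if res.contains p.2 = false then res.insert p.2 [p.1]
          else res.modify p.2 [] (fun l => l ++ [p.1])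
        else res)
      = (fun (g : PySem.Dict String (List String)) (p : String × String) =>
          if pvPb libros cota p.2 = true then g.modify p.2 [] (fun s => s ++ [p.1]) else g) := by
    funext res p
    by_cases h : pvPb libros cota p.2 = true
    · have hc : cantidad_apariciones_autor libros p.2 ≥ cota := by
        have := of_decide_eq_true h
        rwa [cantidad_eq_count]
      simp only [h, if_pos, hc, pvBranch]
    · have hc : ¬ cantidad_apariciones_autor libros p.2 ≥ cota := by
        have := of_decide_eq_false (eq_false_of_ne_true h)
        rwa [cantidad_eq_count]
      simp [hc, h]
  rw [hfun, ← List.foldl_filter]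

-- ===== VERDICT (by name: the statement is the Claim_ definition above) =====
theorem agrupar_por_autor_con_cota_spec : Claim_equal_agrupar_por_autor_con_cota := by
  intro libros cota _
  unfold Spec_agrupar_por_autor_con_cota
  rw [agrupar_eq_filtered, pvGroupItems]
  simp only [agrupar_por_autor_con_cota_alt]
  rw [pvGroupItems, List.filter_map]
  have hvals : (libros.filter (fun p => pvPb libros cota p.2)).map Prod.snd
      = (libros.map Prod.snd).filter (pvPb libros cota) := by
    rw [List.filter_map]; rfl
  rw [hvals, pvOfListFilter]
  have hpred : (PySem.Set.ofList (libros.map Prod.snd)).filter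
        ((fun q : String × List String => decide ((q.2.length : Int) ≥ cota)) ∘
          (fun k => (k, (libros.filter (fun p => p.2 == k)).map Prod.fst)))
      = (PySem.Set.ofList (libros.map Prod.snd)).filter (pvPb libros cota) := by
    apply List.filter_congr
    intro k _
    simp [pvPb, pvGroupLen]
  rw [hpred]

  apply List.map_congr_left
  intro k hk
  have hpk : pvPb libros cota k = true := (List.mem_filter.mp hk).2
  congr 1
  apply congrArg
  rw [List.filter_filter]
  apply List.filter_congr
  intro p _
  by_cases h2 : p.2 = k
  · simp [h2, hpk]
  · simp [h2]
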